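-- pv_equiv track=rewrite | github.com/taeuk0210/Algorithm | 프로그래머스/1/155652. 둘만의 암호/둘만의 암호.py | solution
-- ===== SOURCE A (Python) =====
-- def solution(s, skip, index):
--     answer = ''
--     skip_num = [ord(c) - 97 for c in skip]
--
--     for c in s:
--         i = ord(c) - 97
--         step = 0
--         while step < index:
--             i = (i + 1) % 26
--             if i not in skip_num:
--                 step += 1
--
--         answer += chr(i + 97)
--
--
--     return answer
-- ===== SOURCE B (Python) =====
-- def solution(s, skip, index):
--     if index <= 0:
--         return s
--     allowed = [p for p in range(26) if chr(p + 97) not in skip]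
--     m = len(allowed)
--     table = [chr(allowed[(sum(1 for p in allowed if p <= j) + index - 1) % m] + 97)
--              for j in range(26)]
--     return ''.join(table[(ord(c) - 97) % 26] for c in s)
-- ===== Notes on version B (the rewrite author's own statement) =====
-- stated objective: faster
-- what changed: Instead of stepping each character forward one letter at a time (index steps, scanning skip each step), B precomputes the sorted allowed-letter list once and a 26-entry translation table via modular arithmetic (allowed[(rank+index-1) % len(allowed)]), then maps each character through the table.
-- outside the precondition, e.g. on solution('', 'abcdefghijklmnopqrstuvwxyz', 1): A returns '', B raises ZeroDivisionError
import Mathlib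
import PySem

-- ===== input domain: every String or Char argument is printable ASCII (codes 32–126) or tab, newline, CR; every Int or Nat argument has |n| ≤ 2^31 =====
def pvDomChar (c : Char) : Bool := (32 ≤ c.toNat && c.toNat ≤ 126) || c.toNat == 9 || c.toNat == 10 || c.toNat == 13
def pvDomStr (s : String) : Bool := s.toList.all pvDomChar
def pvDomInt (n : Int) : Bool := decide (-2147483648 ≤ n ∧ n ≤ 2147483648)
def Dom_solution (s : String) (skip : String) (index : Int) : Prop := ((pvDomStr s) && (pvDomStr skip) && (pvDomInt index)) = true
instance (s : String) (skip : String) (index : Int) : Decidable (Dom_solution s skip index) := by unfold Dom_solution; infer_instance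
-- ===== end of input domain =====

-- B replaces A's per-character one-letter-at-a-time stepping loop by a precomputed
-- 26-entry translation table built with modular arithmetic over the allowed-letter
-- list (objective: faster).

-- ===== PORT A =====
-- A's inner `while step < index` loop; the fuel argument only makes the loop total
-- (under Pre_ the fuel chosen by `solution` is never exhausted; with every lowercase
-- letter skipped and index ≥ 1 the Python loop diverges, which Pre_ excludes).
def solWhile (skipNum : List Int) (index : Int) : Nat → Int → Int → Int
  | 0, i, _ => i
  | fuel+1, i, step =>
    if step < index then
      let i' := PySem.Int.mod (i + 1) 26
      if skipNum.contains i' then solWhile skipNum index fuel i' step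
      else solWhile skipNum index fuel i' (step + 1)
    else i

def solution (s : String) (skip : String) (index : Int) : String :=
  let skipNum : List Int := skip.toList.map (fun c => (c.toNat : Int) - 97)
  let answer : List Char := s.toList.foldl (fun answer c =>
    let i := solWhile skipNum index (26 * index.toNat + 26) ((c.toNat : Int) - 97) 0
    answer ++ [Char.ofNat (i + 97).toNat]) []
  String.ofList answer

-- ===== PORT B =====
-- `chr(p+97) not in skip` tests a single-character substring, i.e. membership of that
-- character; `allowed[...]` is always indexed in range when it is nonempty (Pre_), so
-- getD's default is never used.
def solution_alt (s : String) (skip : String) (index : Int) : String :=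
  if index ≤ 0 then s
  else
    let allowed : List Nat := (List.range 26).filter (fun p => !(skip.toList.contains (Char.ofNat (p + 97))))
    let m := allowed.length
    let table : List Char := (List.range 26).map (fun j =>
      let c0 := List.countP (fun p => decide (p ≤ j)) allowed
      Char.ofNat (allowed.getD (PySem.Int.mod ((c0 : Int) + index - 1) (m : Int)).toNat 0 + 97))
    String.ofList (s.toList.map (fun c =>
      table.getD (PySem.Int.mod ((c.toNat : Int) - 97) 26).toNat (Char.ofNat 0)))

-- ===== PRECONDITION & SPEC =====
-- Pre_ excludes index ≥ 1 with skip containing all 26 lowercase letters: there the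
-- Python A loops forever on every nonempty s (it returns '' only for s = ''), while
-- B's natural arithmetic raises ZeroDivisionError.
def Pre_solution (s : String) (skip : String) (index : Int) : Prop :=
  index ≤ 0 ∨ ∃ p ∈ List.range 26, ¬ (skip.toList.contains (Char.ofNat (p + 97)) = true)
instance (s : String) (skip : String) (index : Int) : Decidable (Pre_solution s skip index) := by
  unfold Pre_solution; infer_instance

def pvWitness_solution : String × String × Int := ("ab c!", "by", 3)

def Spec_solution (s : String) (skip : String) (index : Int) (out : String) : Prop := out = solution_alt s skip index
instance (s : String) (skip : String) (index : Int) (out : String) : Decidable (Spec_solution s skip index out) := by unfold Spec_solution; infer_instance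

-- ===== CLAIM (what is proved, stated in full; the proofs are below) =====
def Claim_equal_solution : Prop := ∀ (s : String) (skip : String) (index : Int), Dom_solution s skip index → Pre_solution s skip index → Spec_solution s skip index (solution s skip index)

-- ===== LEMMAS AND PROOFS =====

-- Is letter p (0 ≤ p < 26) one of the skipped letters?
def pvS (skip : String) (p : Nat) : Bool := skip.toList.contains (Char.ofNat (p + 97))

def pvAllowed (skip : String) : List Nat := (List.range 26).filter (fun p => !(pvS skip p))

-- number of allowed letters strictly below k
def pvCnt (skip : String) (k : Nat) : Nat := ((List.range k).filter (fun p => !(pvS skip p))).length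

-- closed form: the letter reached after n ≥ 1 allowed-steps starting from residue j
def pvG (skip : String) (n j : Nat) : Nat :=
  (pvAllowed skip).getD ((pvCnt skip (j+1) + n - 1) % (pvAllowed skip).length) 0

theorem pvChar_toNat (n : Nat) (h : n < 55296) : (Char.ofNat n).toNat = n := by
  rw [Char.toNat_ofNat]; simp [Nat.isValidChar]; omega

-- the membership test of A's loop agrees with pvS on normalized residues
theorem pv_bridge (skip : String) (t : Nat) (ht : t < 26) :
    ((skip.toList.map (fun c => (c.toNat : Int) - 97)).contains ((t : Nat) : Int) = true) ↔ pvS skip t = true := by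
  constructor
  · intro h
    have hmem : ((t : Nat) : Int) ∈ skip.toList.map (fun c => (c.toNat : Int) - 97) := by
      simpa using h
    obtain ⟨c, hc, he⟩ := List.mem_map.mp hmem
    have h1 : c.toNat = t + 97 := by omega
    have h2 : Char.ofNat (t + 97) = c := by rw [← h1, Char.ofNat_toNat]
    simp only [pvS, h2]
    simpa using hc
  · intro h
    have hc : Char.ofNat (t + 97) ∈ skip.toList := by simpa [pvS] using h
    have hmem : ((t : Nat) : Int) ∈ skip.toList.map (fun c => (c.toNat : Int) - 97) := by
      refine List.mem_map.mpr ⟨Char.ofNat (t + 97), hc, ?_⟩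
      have := pvChar_toNat (t + 97) (by omega)
      omega
    simpa using hmem

theorem pv_exists_first (skip : String) (hne : ∃ r, r < 26 ∧ pvS skip r = false) (j : Nat) (hj : j < 26) :
    ∃ t, 1 ≤ t ∧ t ≤ 26 ∧ pvS skip ((j+t) % 26) = false ∧
      ∀ u, 1 ≤ u → u < t → pvS skip ((j+u) % 26) = true := by
  obtain ⟨r, hr, hrS⟩ := hne
  have hQ : ∃ t, pvS skip ((j+1+t) % 26) = false := by
    refine ⟨(r + 26 - ((j+1) % 26)) % 26, ?_⟩
    have harg : (j + 1 + ((r + 26 - ((j+1) % 26)) % 26)) % 26 = r := by omega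
    rw [harg]; exact hrS
  refine ⟨Nat.find hQ + 1, by omega, ?_, ?_, ?_⟩
  · have h25 : (r + 26 - ((j+1) % 26)) % 26 ≤ 25 := by omega
    have := Nat.find_min' hQ (m := (r + 26 - ((j+1) % 26)) % 26) (by
      have harg : (j + 1 + ((r + 26 - ((j+1) % 26)) % 26)) % 26 = r := by omega
      rw [harg]; exact hrS)
    omega
  · have harg : (j + (Nat.find hQ + 1)) % 26 = (j + 1 + Nat.find hQ) % 26 := by omega
    rw [harg]; exact Nat.find_spec hQ
  · intro u h1 h2
    have hmin := Nat.find_min hQ (m := u - 1) (by omega)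
    have harg : (j + 1 + (u - 1)) % 26 = (j + u) % 26 := by omega
    rw [harg] at hmin
    simpa using hmin

theorem pv_c0_eq (skip : String) (j : Nat) (hj : j < 26) :
    List.countP (fun p => decide (p ≤ j)) (pvAllowed skip) = pvCnt skip (j+1) := by
  have hsplit : (26 : Nat) = (j+1) + (25-j) := by omega
  rw [pvAllowed, List.countP_filter, pvCnt, hsplit, List.range_add, List.countP_append]
  have h1 : List.countP (fun p => decide (p ≤ j) && !pvS skip p) (List.range (j+1))
      = (List.filter (fun p => !pvS skip p) (List.range (j+1))).length := by
    rw [← List.countP_eq_length_filter]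
    refine List.countP_congr ?_
    intro a ha
    have : a ≤ j := by have := List.mem_range.mp ha; omega
    simp [this]
  have h2 : List.countP (fun p => decide (p ≤ j) && !pvS skip p)
      (List.map (fun x => (j+1) + x) (List.range (25-j))) = 0 := by
    rw [List.countP_eq_zero]
    intro a ha
    obtain ⟨x, hx, rfl⟩ := List.mem_map.mp ha
    intro hcontra
    simp only [Bool.and_eq_true, decide_eq_true_eq] at hcontra
    omega
  have h3 : (List.filter (fun p => !pvS skip p) (List.map (fun x => (j+1) + x) (List.range (25-j)))).length
      = List.countP (fun p => !pvS skip p) (List.map (fun x => (j+1) + x) (List.range (25-j))) := by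
    rw [← List.countP_eq_length_filter]
  rw [h1, h2]
  omega

theorem pv_cnt_succ (skip : String) (k : Nat) :
    pvCnt skip (k+1) = pvCnt skip k + (if pvS skip k then 0 else 1) := by
  rw [pvCnt, pvCnt, List.range_succ, List.filter_append, List.length_append]
  cases h : pvS skip k <;> simp [h]

theorem pv_cnt26 (skip : String) : pvCnt skip 26 = (pvAllowed skip).length := rfl

theorem pv_getD (skip : String) (r : Nat) (hr : r < 26) (hS : pvS skip r = false) :
    pvCnt skip r < (pvAllowed skip).length ∧ (pvAllowed skip).getD (pvCnt skip r) 0 = r := by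
  have h26 : (26 : Nat) = (r+1) + (25 - r) := by omega
  have hrange : List.range 26 = (List.range r ++ [r]) ++ (List.range (25-r)).map (fun x => (r+1) + x) := by
    rw [h26, List.range_add, List.range_succ]
  have hfil : pvAllowed skip
      = (List.range r).filter (fun p => !pvS skip p)
        ++ (r :: ((List.range (25-r)).map (fun x => (r+1)+x)).filter (fun p => !pvS skip p)) := by
    rw [pvAllowed, hrange]
    simp [List.filter_append, hS]
  have hL1 : ((List.range r).filter (fun p => !pvS skip p)).length = pvCnt skip r := rfl
  constructor
  · rw [hfil, List.length_append, List.length_cons, hL1]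
    omega
  · rw [hfil, List.getD_eq_getElem?_getD, List.getElem?_append_right (by omega)]
    simp [hL1]

theorem pv_Ghit1 (skip : String) (j : Nat) (hj : j < 26) (hS : pvS skip ((j+1) % 26) = false) :
    pvG skip 1 j = (j+1) % 26 := by
  by_cases hj25 : j < 25
  · have hj1 : (j+1) % 26 = j+1 := by omega
    rw [hj1] at hS ⊢
    obtain ⟨hlt, hget⟩ := pv_getD skip (j+1) (by omega) hS
    rw [pvG, Nat.add_sub_cancel, Nat.mod_eq_of_lt hlt]
    exact hget
  · have hj' : j = 25 := by omega
    subst hj'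
    have hz : (25+1) % 26 = 0 := by norm_num
    rw [hz] at hS ⊢
    obtain ⟨hlt, hget⟩ := pv_getD skip 0 (by omega) hS
    rw [pvG, pv_cnt26, Nat.add_sub_cancel, Nat.mod_self]
    exact hget

theorem pv_Gskip (skip : String) (n j : Nat) (hj : j < 26) (hn : 1 ≤ n)
    (hS : pvS skip ((j+1) % 26) = true) :
    pvG skip n j = pvG skip n ((j+1) % 26) := by
  by_cases hj25 : j < 25
  · have hj1 : (j+1) % 26 = j+1 := by omega
    rw [hj1] at hS ⊢
    have hcnt : pvCnt skip (j+1+1) = pvCnt skip (j+1) := by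
      rw [pv_cnt_succ, hS]; rfl
    rw [pvG, pvG, hcnt]
  · have hj' : j = 25 := by omega
    subst hj'
    have hz : (25+1) % 26 = 0 := by norm_num
    rw [hz] at hS ⊢
    have hc1 : pvCnt skip 1 = 0 := by
      rw [show (1:Nat) = 0 + 1 from rfl, pv_cnt_succ, hS]
      rfl
    have hm : pvCnt skip (25+1) + n - 1 = (pvCnt skip 1 + n - 1) + (pvAllowed skip).length := by
      rw [pv_cnt26, hc1]; omega
    rw [pvG, pvG, hm, Nat.add_mod_right]

theorem pv_Ghit (skip : String) (n j : Nat) (hj : j < 26) (hn : 2 ≤ n)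
    (hS : pvS skip ((j+1) % 26) = false) :
    pvG skip n j = pvG skip (n-1) ((j+1) % 26) := by
  by_cases hj25 : j < 25
  · have hj1 : (j+1) % 26 = j+1 := by omega
    rw [hj1] at hS ⊢
    have hcnt : pvCnt skip (j+1+1) = pvCnt skip (j+1) + 1 := by
      rw [pv_cnt_succ, hS]; rfl
    have hidx : pvCnt skip (j+1+1) + (n-1) - 1 = pvCnt skip (j+1) + n - 1 := by
      rw [hcnt]; omega
    rw [pvG, pvG, hidx]
  · have hj' : j = 25 := by omega
    subst hj'
    have hz : (25+1) % 26 = 0 := by norm_num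
    rw [hz] at hS ⊢
    have hc1 : pvCnt skip 1 = 1 := by
      rw [show (1:Nat) = 0 + 1 from rfl, pv_cnt_succ, hS]
      rfl
    have hm : pvCnt skip (25+1) + n - 1 = (pvCnt skip 1 + (n-1) - 1) + (pvAllowed skip).length := by
      rw [pv_cnt26, hc1]; omega
    rw [pvG, pvG, hm, Nat.add_mod_right]

theorem pv_whilestop (skipNum : List Int) (index : Int) (f : Nat) (i step : Int)
    (h : ¬ step < index) : solWhile skipNum index f i step = i := by
  cases f <;> simp [solWhile, h]

theorem pv_loop (skip : String) (index : Int) :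
      ∀ (fuel n j t : Nat) (i step : Int),
      j < 26 → i % 26 = (j : Int) → index - step = (n : Int) → 1 ≤ n →
      (1 ≤ t ∧ t ≤ 26 ∧ pvS skip ((j+t) % 26) = false ∧
        ∀ u, 1 ≤ u → u < t → pvS skip ((j+u) % 26) = true) →
      26*(n-1)+t ≤ fuel →
      (∃ r, r < 26 ∧ pvS skip r = false) →
      solWhile (skip.toList.map (fun c => (c.toNat : Int) - 97)) index fuel i step
        = ((pvG skip n j : Nat) : Int) := by
  intro fuel
  induction fuel with
  | zero =>
    intro n j t i step hj hi hns hn hfirst hfuel hne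
    exfalso
    obtain ⟨ht1, -, -, -⟩ := hfirst
    omega
  | succ fuel ih =>
    intro n j t i step hj hi hns hn hfirst hfuel hne
    obtain ⟨ht1, ht26, htS, htmin⟩ := hfirst
    have hstep : step < index := by omega
    have hij1 : PySem.Int.mod (i + 1) 26 = (((j+1) % 26 : Nat) : Int) := by
      rw [PySem.Int.mod_eq_emod_of_pos (by norm_num)]
      omega
    have hbr := pv_bridge skip ((j+1) % 26) (by omega)
    by_cases hSj1 : pvS skip ((j+1) % 26) = true
    · have hcont : (skip.toList.map (fun c => (c.toNat : Int) - 97)).contains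
          (((j+1) % 26 : Nat) : Int) = true := hbr.mpr hSj1
      have ht2 : 2 ≤ t := by
        rcases Nat.lt_or_ge t 2 with h | h
        · exfalso
          have : t = 1 := by omega
          rw [this] at htS
          rw [htS] at hSj1
          exact absurd hSj1 (by simp)
        · exact h
      have hrec := ih n ((j+1) % 26) (t-1) (((j+1) % 26 : Nat) : Int) step
        (by omega) (by omega) hns hn
        ⟨by omega, by omega,
          by
            have harg : ((j+1) % 26 + (t-1)) % 26 = (j+t) % 26 := by omega
            rw [harg]; exact htS,
          by
            intro u h1 h2
            have harg : ((j+1) % 26 + u) % 26 = (j+(u+1)) % 26 := by omega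
            rw [harg]; exact htmin (u+1) (by omega) (by omega)⟩
        (by omega) hne
      rw [solWhile]
      simp only [if_pos hstep, hij1, hcont, if_pos]
      rw [hrec, pv_Gskip skip n j hj hn hSj1]
    · have hSf : pvS skip ((j+1) % 26) = false := by simpa using hSj1
      have hcont : ¬ ((skip.toList.map (fun c => (c.toNat : Int) - 97)).contains
          (((j+1) % 26 : Nat) : Int) = true) := fun h => hSj1 (hbr.mp h)
      rw [solWhile]
      simp only [if_pos hstep, hij1]
      rw [if_neg (by simpa using hcont)]
      by_cases hn1 : n = 1
      · subst hn1
        rw [pv_whilestop _ _ _ _ _ (by omega)]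
        rw [pv_Ghit1 skip j hj hSf]
      · have hn2 : 2 ≤ n := by omega
        obtain ⟨t', ht'⟩ := pv_exists_first skip hne ((j+1) % 26) (by omega)
        have hrec := ih (n-1) ((j+1) % 26) t' (((j+1) % 26 : Nat) : Int) (step + 1)
          (by omega) (by omega) (by omega) (by omega) ht' (by omega) hne
        rw [hrec, pv_Ghit skip n j hj hn2 hSf]

-- building a string by repeated append is mapping
theorem pv_foldl_map {α : Type} (f : α → Char) (l : List α) (acc : List Char) :
    l.foldl (fun answer c => answer ++ [f c]) acc = acc ++ l.map f := by
  induction l generalizing acc with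
  | nil => simp
  | cons c l ih => simp [ih]

theorem pv_table_getD (f : Nat → Char) (d : Char) (j : Nat) (hj : j < 26) :
    ((List.range 26).map f).getD j d = f j := by
  rw [List.getD_eq_getElem?_getD, List.getElem?_map]
  simp [hj]

-- per-character agreement of the two ports when index ≥ 1 and a letter is allowed
theorem pv_char (skip : String) (index : Int) (hidx : 1 ≤ index)
    (hne : ∃ r, r < 26 ∧ pvS skip r = false) (c : Char) :
    Char.ofNat ((solWhile (skip.toList.map (fun c => (c.toNat : Int) - 97)) index
        (26 * index.toNat + 26) ((c.toNat : Int) - 97) 0) + 97).toNat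
    = ((List.range 26).map (fun j =>
        let c0 := List.countP (fun p => decide (p ≤ j))
          ((List.range 26).filter (fun p => !(skip.toList.contains (Char.ofNat (p + 97)))))
        Char.ofNat
          (((List.range 26).filter (fun p => !(skip.toList.contains (Char.ofNat (p + 97))))).getD
            (PySem.Int.mod ((c0 : Int) + index - 1)
              ((((List.range 26).filter (fun p => !(skip.toList.contains (Char.ofNat (p + 97))))).length : Nat) : Int)).toNat
            0 + 97))).getD
      (PySem.Int.mod ((c.toNat : Int) - 97) 26).toNat (Char.ofNat 0) := by
  have hallow : ((List.range 26).filter (fun p => !(skip.toList.contains (Char.ofNat (p + 97)))))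
      = pvAllowed skip := rfl
  have hjlt : (((c.toNat : Int) - 97) % 26).toNat < 26 := by omega
  have hjmod : (PySem.Int.mod ((c.toNat : Int) - 97) 26).toNat = (((c.toNat : Int) - 97) % 26).toNat := by
    rw [PySem.Int.mod_eq_emod_of_pos (by norm_num)]
  obtain ⟨t, hfirst⟩ := pv_exists_first skip hne ((((c.toNat : Int) - 97) % 26).toNat) hjlt
  have hA := pv_loop skip index (26 * index.toNat + 26) index.toNat
    ((((c.toNat : Int) - 97) % 26).toNat) t ((c.toNat : Int) - 97) 0
    hjlt (by omega) (by omega) (by omega) hfirst (by obtain ⟨h1, h2, -, -⟩ := hfirst; omega) hne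
  rw [hA, hjmod, hallow, pv_table_getD _ _ _ hjlt]
  have hc0 := pv_c0_eq skip ((((c.toNat : Int) - 97) % 26).toNat) hjlt
  simp only [hc0]
  have hN : ((pvCnt skip ((((c.toNat : Int) - 97) % 26).toNat + 1) : Nat) : Int) + index - 1
      = ((pvCnt skip ((((c.toNat : Int) - 97) % 26).toNat + 1) + index.toNat - 1 : Nat) : Int) := by
    omega
  rw [hN]
  rw [pvG]
  have hg : (((pvG skip index.toNat ((((c.toNat : Int) - 97) % 26).toNat) : Nat) : Int) + 97).toNat
      = pvG skip index.toNat ((((c.toNat : Int) - 97) % 26).toNat) + 97 := by omega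
  rw [pvG] at hg
  rw [hg]
  rw [PySem.Int.mod_natCast, Int.toNat_natCast]

-- ===== VERDICT (by name: the statement is the Claim_ definition above) =====
theorem solution_spec : Claim_equal_solution := by
  unfold Claim_equal_solution
  intro s skip index _hdom hpre
  unfold Spec_solution solution solution_alt
  by_cases hidx : index ≤ 0
  · rw [if_pos hidx]
    have hchar : ∀ c : Char,
        Char.ofNat ((solWhile (skip.toList.map (fun c => (c.toNat : Int) - 97)) index
          (26 * index.toNat + 26) ((c.toNat : Int) - 97) 0) + 97).toNat = c := by
      intro c
      rw [pv_whilestop _ _ _ _ _ (by omega)]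
      have h1 : ((c.toNat : Int) - 97 + 97).toNat = c.toNat := by omega
      rw [h1, Char.ofNat_toNat]
    simp only []
    rw [pv_foldl_map]
    simp [hchar]
  · rw [if_neg hidx]
    have hne : ∃ r, r < 26 ∧ pvS skip r = false := by
      rcases hpre with h | ⟨p, hp, hnp⟩
      · omega
      · exact ⟨p, List.mem_range.mp hp, by simpa [pvS] using hnp⟩
    simp only []
    rw [pv_foldl_map]
    simp only [List.nil_append]
    refine congrArg String.ofList (List.map_congr_left ?_)
    intro c _
    exact pv_char skip index (by omega) hne c
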